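-- pv_equiv track=rewrite | github.com/yogzz2023/jul3 | july3_!!.py | form_measurement_groups
-- ===== SOURCE A (Python) =====
-- def form_measurement_groups(measurements, max_time_diff=50):
--     measurement_groups = []
--     current_group = []
--     base_time = measurements[0][3]
--
--     for measurement in measurements:
--         if measurement[3] - base_time <= max_time_diff:
--             current_group.append(measurement)
--         else:
--             measurement_groups.append(current_group)
--             current_group = [measurement]
--             base_time = measurement[3]
--
--     if current_group:
--         measurement_groups.append(current_group)
--
--     return measurement_groups
-- ===== SOURCE B (Python) =====
-- def form_measurement_groups(measurements, max_time_diff=50):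
--     # one pass computing group-start boundaries, then materialize groups by slicing
--     base_time = measurements[0][3]
--     boundaries = [0]
--     for i, m in enumerate(measurements):
--         if m[3] - base_time > max_time_diff:
--             boundaries.append(i)
--             base_time = m[3]
--     boundaries.append(len(measurements))
--     return [measurements[b:e] for b, e in zip(boundaries, boundaries[1:])]
-- ===== Notes on version B (the rewrite author's own statement) =====
-- stated objective: alternative
-- what changed: B replaces A's incremental append/flush group accumulation with one pass that records group-start boundary indices and then materializes the groups by slicing between consecutive boundaries.
-- outside the precondition, e.g. on form_measurement_groups([], 50): A raises IndexError, B raises IndexError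
import Mathlib
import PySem

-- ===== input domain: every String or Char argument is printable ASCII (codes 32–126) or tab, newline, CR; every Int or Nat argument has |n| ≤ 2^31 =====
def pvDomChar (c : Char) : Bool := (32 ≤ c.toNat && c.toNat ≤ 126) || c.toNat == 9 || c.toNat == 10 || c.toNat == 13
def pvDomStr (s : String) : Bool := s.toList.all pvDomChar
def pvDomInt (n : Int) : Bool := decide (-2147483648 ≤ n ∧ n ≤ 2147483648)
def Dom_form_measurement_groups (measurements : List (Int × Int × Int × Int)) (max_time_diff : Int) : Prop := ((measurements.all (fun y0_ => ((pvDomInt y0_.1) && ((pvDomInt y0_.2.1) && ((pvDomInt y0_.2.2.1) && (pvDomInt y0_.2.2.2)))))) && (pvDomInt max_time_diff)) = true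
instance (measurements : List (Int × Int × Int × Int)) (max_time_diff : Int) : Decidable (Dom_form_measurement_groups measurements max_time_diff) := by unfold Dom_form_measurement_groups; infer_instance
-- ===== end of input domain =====

-- B computes group-start boundary indices in one pass and materializes groups by slicing; objective: alternative decomposition, same cost.
-- ===== PORT A =====
-- loop body of A: state = (measurement_groups, current_group, base_time)
def pvStepA (max_time_diff : Int)
    (st : List (List (Int × Int × Int × Int)) × List (Int × Int × Int × Int) × Int)
    (m : Int × Int × Int × Int) :
    List (List (Int × Int × Int × Int)) × List (Int × Int × Int × Int) × Int :=
  if m.2.2.2 - st.2.2 ≤ max_time_diff then (st.1, st.2.1 ++ [m], st.2.2)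
  else (st.1 ++ [st.2.1], [m], m.2.2.2)

def form_measurement_groups (measurements : List (Int × Int × Int × Int)) (max_time_diff : Int) : List (List (Int × Int × Int × Int)) :=
  match PySem.List.pyGet? measurements 0 with
  | none => []  -- measurements[0] raises IndexError on []; excluded by Pre_
  | some m0 =>
    let st := measurements.foldl (pvStepA max_time_diff) ([], [], m0.2.2.2)
    if st.2.1 ≠ [] then st.1 ++ [st.2.1] else st.1

-- ===== PORT B =====
-- loop body of B: state = (boundaries, base_time); im = (i, measurement) from enumerate
def pvStepB (max_time_diff : Int) (st : List Int × Int) (im : Int × (Int × Int × Int × Int)) :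
    List Int × Int :=
  if im.2.2.2.2 - st.2 > max_time_diff then (st.1 ++ [im.1], im.2.2.2.2) else st

def form_measurement_groups_alt (measurements : List (Int × Int × Int × Int)) (max_time_diff : Int) : List (List (Int × Int × Int × Int)) :=
  match PySem.List.pyGet? measurements 0 with
  | none => []  -- measurements[0] raises IndexError on []; excluded by Pre_
  | some m0 =>
    let st := (PySem.List.enumerate measurements 0).foldl (pvStepB max_time_diff) ([(0 : Int)], m0.2.2.2)
    let bs := st.1 ++ [(measurements.length : Int)]
    -- zip(boundaries, boundaries[1:]); boundaries[1:] on a list is its tail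
    (bs.zip bs.tail).map (fun be => PySem.List.slice measurements (some be.1) (some be.2))

-- ===== PRECONDITION & SPEC =====
-- A (and B) raise IndexError on the empty list (measurements[0]); Pre_ excludes exactly that.
def Pre_form_measurement_groups (measurements : List (Int × Int × Int × Int)) (max_time_diff : Int) : Prop := measurements ≠ []
instance (measurements : List (Int × Int × Int × Int)) (max_time_diff : Int) : Decidable (Pre_form_measurement_groups measurements max_time_diff) := by unfold Pre_form_measurement_groups; infer_instance
def pvWitness_form_measurement_groups : (List (Int × Int × Int × Int)) × Int := ([(1, 2, 3, 0), (4, 5, 6, 10), (7, 8, 9, 100)], 50)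

def Spec_form_measurement_groups (measurements : List (Int × Int × Int × Int)) (max_time_diff : Int) (out : List (List (Int × Int × Int × Int))) : Prop := out = form_measurement_groups_alt measurements max_time_diff
instance (measurements : List (Int × Int × Int × Int)) (max_time_diff : Int) (out : List (List (Int × Int × Int × Int))) : Decidable (Spec_form_measurement_groups measurements max_time_diff out) := by unfold Spec_form_measurement_groups; infer_instance

-- ===== CLAIM (what is proved, stated in full; the proofs are below) =====
def Claim_equal_form_measurement_groups : Prop := ∀ (measurements : List (Int × Int × Int × Int)) (max_time_diff : Int), Dom_form_measurement_groups measurements max_time_diff → Pre_form_measurement_groups measurements max_time_diff → Spec_form_measurement_groups measurements max_time_diff (form_measurement_groups measurements max_time_diff)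

-- ===== LEMMAS AND PROOFS =====

-- reference recursion for A's grouping loop
def pvGo (max_time_diff base : Int) (cur : List (Int × Int × Int × Int)) :
    List (Int × Int × Int × Int) → List (List (Int × Int × Int × Int))
  | [] => if cur ≠ [] then [cur] else []
  | x :: xs =>
    if x.2.2.2 - base ≤ max_time_diff then pvGo max_time_diff base (cur ++ [x]) xs
    else cur :: pvGo max_time_diff x.2.2.2 [x] xs

-- reference recursion for B's boundary loop
def pvGoB (max_time_diff base j : Int) :
    List (Int × Int × Int × Int) → List Int
  | [] => []
  | x :: xs =>
    if x.2.2.2 - base > max_time_diff then j :: pvGoB max_time_diff x.2.2.2 (j + 1) xs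
    else pvGoB max_time_diff base (j + 1) xs

def pvPairs (ms : List (Int × Int × Int × Int)) (bs : List Int) : List (List (Int × Int × Int × Int)) :=
  (bs.zip bs.tail).map (fun be => PySem.List.slice ms (some be.1) (some be.2))

lemma pvPairs_cons (ms : List (Int × Int × Int × Int)) (a b : Int) (r : List Int) :
    pvPairs ms (a :: b :: r) = PySem.List.slice ms (some a) (some b) :: pvPairs ms (b :: r) := rfl

lemma pvA_fold (max_time_diff : Int) :
    ∀ (l : List (Int × Int × Int × Int)) groups cur base,
      (if (l.foldl (pvStepA max_time_diff) (groups, cur, base)).2.1 ≠ [] then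
        (l.foldl (pvStepA max_time_diff) (groups, cur, base)).1 ++ [(l.foldl (pvStepA max_time_diff) (groups, cur, base)).2.1]
       else (l.foldl (pvStepA max_time_diff) (groups, cur, base)).1)
        = groups ++ pvGo max_time_diff base cur l := by
  intro l
  induction l with
  | nil => intro groups cur base; simp only [List.foldl_nil, pvGo]; split_ifs <;> simp_all
  | cons x xs ih =>
    intro groups cur base
    simp only [List.foldl_cons, pvGo, pvStepA]
    by_cases h : x.2.2.2 - base ≤ max_time_diff
    · simp only [h, if_pos, if_true]
      exact ih groups (cur ++ [x]) base
    · simp only [h, if_false]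
      rw [ih (groups ++ [cur]) [x] x.2.2.2]
      simp

lemma pvB_fold (max_time_diff : Int) :
    ∀ (l : List (Int × Int × Int × Int)) (s : Int) (bs : List Int) (base : Int),
      ((PySem.List.enumerate l s).foldl (pvStepB max_time_diff) (bs, base)).1
        = bs ++ pvGoB max_time_diff base s l := by
  intro l
  induction l with
  | nil => intro s bs base; simp [PySem.List.enumerate_nil, pvGoB]
  | cons x xs ih =>
    intro s bs base
    rw [PySem.List.enumerate_cons]
    simp only [List.foldl_cons, pvStepB, pvGoB]
    by_cases h : x.2.2.2 - base > max_time_diff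
    · simp only [h, if_pos, if_true]
      rw [ih (s + 1) (bs ++ [s]) x.2.2.2]
      simp
    · simp only [h, if_neg, ite_false]
      exact ih (s + 1) bs base

lemma pvSlice_natCast' (ms : List (Int × Int × Int × Int)) (a b : Nat) :
    PySem.List.slice ms (some (a : Int)) (some (b : Int)) = (ms.drop a).take (b - a) :=
  PySem.List.slice_natCast ms a b

lemma pvSlice_snoc (ms : List (Int × Int × Int × Int)) (j0 j : Nat)
    (hle : j0 ≤ j) (hj : j < ms.length) :
    PySem.List.slice ms (some (j0 : Int)) (some (j : Int)) ++ [ms[j]]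
      = PySem.List.slice ms (some (j0 : Int)) (some ((j : Int) + 1)) := by
  have : ((j : Int) + 1) = ((j + 1 : Nat) : Int) := by push_cast; ring
  rw [this, pvSlice_natCast', pvSlice_natCast']
  have hd : (ms.drop j0)[j - j0]'(by simp; omega) = ms[j] := by
    rw [List.getElem_drop]; congr 1; omega
  rw [show j + 1 - j0 = (j - j0) + 1 from by omega, List.take_succ]
  rw [List.getElem?_eq_getElem (by simp; omega), hd]
  rfl

lemma pvMain (max_time_diff : Int) (ms : List (Int × Int × Int × Int)) :
    ∀ (l : List (Int × Int × Int × Int)) (j j0 : Nat) (base : Int),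
      ms.drop j = l → j0 ≤ j → j ≤ ms.length → (j0 < j ∨ l ≠ []) →
      pvGo max_time_diff base (PySem.List.slice ms (some (j0 : Int)) (some (j : Int))) l
        = pvPairs ms ((j0 : Int) :: (pvGoB max_time_diff base (j : Int) l ++ [(ms.length : Int)])) := by
  intro l
  induction l with
  | nil =>
    intro j j0 base hdrop hle hjn hne
    have hj : j = ms.length := by
      have := List.drop_eq_nil_iff.mp hdrop; omega
    have hlt : j0 < j := by
      rcases hne with h | h
      · exact h
      · exact absurd rfl h
    simp only [pvGo, pvGoB, List.nil_append, pvPairs]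
    subst hj
    have hne2 : PySem.List.slice ms (some (j0 : Int)) (some ((ms.length : Int))) ≠ [] := by
      rw [pvSlice_natCast']
      have h1 : (ms.drop j0).length = ms.length - j0 := by simp
      intro hc
      have := congrArg List.length hc
      simp [h1] at this
      omega
    rw [if_pos hne2]
    simp [pvPairs]
  | cons x xs ih =>
    intro j j0 base hdrop hle hjn hne
    have hj : j < ms.length := by
      by_contra hc
      rw [List.drop_eq_nil_iff.mpr (by omega)] at hdrop
      exact List.cons_ne_nil x xs hdrop.symm
    have hx : ms[j] = x := by
      have h0 : (ms.drop j)[0]? = some x := by rw [hdrop]; rfl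
      rw [List.getElem?_drop] at h0
      simp only [Nat.add_zero] at h0
      rw [List.getElem?_eq_getElem hj] at h0
      exact Option.some.inj h0
    have hxs : ms.drop (j + 1) = xs := by
      have := congrArg List.tail hdrop
      simpa [List.tail_drop] using this
    simp only [pvGo, pvGoB]
    have hcast : ((j : Int) + 1) = ((j + 1 : Nat) : Int) := by push_cast; ring
    by_cases h : x.2.2.2 - base ≤ max_time_diff
    · have h2 : ¬ (x.2.2.2 - base > max_time_diff) := by omega
      simp only [h, h2, if_pos, if_neg, ite_true, ite_false]
      rw [show PySem.List.slice ms (some (j0 : Int)) (some (j : Int)) ++ [x]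
            = PySem.List.slice ms (some (j0 : Int)) (some ((j : Int) + 1)) from by
              rw [← hx]; exact pvSlice_snoc ms j0 j hle hj]
      rw [hcast]
      exact ih (j + 1) j0 base hxs (by omega) (by omega) (Or.inl (by omega))
    · have h2 : x.2.2.2 - base > max_time_diff := by omega
      simp only [h, h2, if_pos, if_neg, ite_true, ite_false]
      rw [List.cons_append, pvPairs_cons]
      congr 1
      have hcur : PySem.List.slice ms (some ((j : Int))) (some ((j : Int) + 1)) = [x] := by
        rw [← hx, ← pvSlice_snoc ms j j (le_refl j) hj]
        rw [pvSlice_natCast']; simp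
      rw [hcast] at hcur ⊢
      rw [← hcur]
      exact ih (j + 1) j x.2.2.2 hxs (by omega) (by omega) (Or.inl (by omega))

-- ===== VERDICT (by name: the statement is the Claim_ definition above) =====
theorem form_measurement_groups_spec : Claim_equal_form_measurement_groups := by
  intro measurements max_time_diff _ hpre
  unfold Spec_form_measurement_groups
  obtain ⟨m0, rest, rfl⟩ : ∃ m0 rest, measurements = m0 :: rest := by
    cases measurements with
    | nil => exact absurd rfl hpre
    | cons a b => exact ⟨a, b, rfl⟩
  unfold form_measurement_groups form_measurement_groups_alt
  rw [PySem.List.pyGet?_zero_cons]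
  simp only
  rw [pvA_fold max_time_diff (m0 :: rest) [] [] m0.2.2.2, List.nil_append]
  rw [pvB_fold max_time_diff (m0 :: rest) 0 [(0 : Int)] m0.2.2.2]
  have h0 : ([(0 : Int)] ++ pvGoB max_time_diff m0.2.2.2 0 (m0 :: rest)) ++ [((m0 :: rest).length : Int)]
      = (((0 : Nat) : Int)) :: (pvGoB max_time_diff m0.2.2.2 ((0 : Nat) : Int) (m0 :: rest) ++ [((m0 :: rest).length : Int)]) := by
    simp
  rw [h0]
  have hsl : PySem.List.slice (m0 :: rest) (some ((0 : Nat) : Int)) (some ((0 : Nat) : Int)) = [] := by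
    rw [pvSlice_natCast']; simp
  have hmain := pvMain max_time_diff (m0 :: rest) (m0 :: rest) 0 0 m0.2.2.2 (by simp) (le_refl 0)
    (by simp) (Or.inr (List.cons_ne_nil m0 rest))
  rw [hsl] at hmain
  exact hmain
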